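-- pv_equiv track=rewrite | github.com/cfpb/eregs-2.0 | eregs_core/diffs.py | merge_text_diff
-- ===== SOURCE A (Python) =====
-- def merge_text_diff(diff):
--
--     text = ''
--     flag = 'common' # other values: add, delete
--     for d in diff:
--         if d[0] == ' ':
--             if flag == 'delete':
--                 text += '</del>' + d[2]
--             elif flag == 'add':
--                 text += '</ins>' + d[2]
--             elif flag == 'common':
--                 text += d[2]
--             flag = 'common'
--         elif d[0] == '-':
--             if flag == 'common':
--                 text += '<del>' + d[2]
--             elif flag == 'delete':
--                 text += d[2]
--             elif flag == 'add':
--                 text += '</ins>' + '<del>' + d[2]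
--             flag = 'delete'
--         elif d[0] == '+':
--             if flag == 'common':
--                 text += '<ins>' + d[2]
--             elif flag == 'add':
--                 text += d[2]
--             elif flag == 'delete':
--                 text += '</del>' + '<ins>' + d[2]
--             flag = 'add'
--
--     if flag == 'add':
--         text += '</ins>'
--     elif flag == 'delete':
--         text += '</del>'
--
--     return text
-- ===== SOURCE B (Python) =====
-- def merge_text_diff(diff):
--     kept = [(d[0], d[2]) for d in diff if d[0] in (' ', '-', '+')]
--     out = []
--     i = 0
--     n = len(kept)
--     while i < n:
--         m = kept[i][0]
--         j = i
--         while j < n and kept[j][0] == m: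
--             j += 1
--         text = ''.join(t for _, t in kept[i:j])
--         if m == '-':
--             out.append('<del>' + text + '</del>')
--         elif m == '+':
--             out.append('<ins>' + text + '</ins>')
--         else:
--             out.append(text)
--         i = j
--     return ''.join(out)
-- ===== Notes on version B (the rewrite author's own statement) =====
-- stated objective: simpler
-- what changed: Replaced A's flag/transition state machine (nine transition cases plus a final closing-tag fixup) by a filter of the kept markers followed by grouping consecutive equal markers and wrapping each group's joined text once.
import Mathlib
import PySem

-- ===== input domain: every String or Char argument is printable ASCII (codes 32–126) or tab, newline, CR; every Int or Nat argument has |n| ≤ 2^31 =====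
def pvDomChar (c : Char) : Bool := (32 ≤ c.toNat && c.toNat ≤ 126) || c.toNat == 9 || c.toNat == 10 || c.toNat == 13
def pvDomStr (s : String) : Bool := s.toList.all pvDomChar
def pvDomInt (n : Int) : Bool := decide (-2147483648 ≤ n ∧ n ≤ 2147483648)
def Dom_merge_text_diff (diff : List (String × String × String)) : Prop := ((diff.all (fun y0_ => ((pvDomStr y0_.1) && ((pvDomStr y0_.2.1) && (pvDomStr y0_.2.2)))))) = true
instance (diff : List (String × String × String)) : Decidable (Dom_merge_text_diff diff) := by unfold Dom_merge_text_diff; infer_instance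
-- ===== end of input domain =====

-- B replaces A's flag/transition state machine by a filter + group-runs-then-wrap pass (objective: simpler decomposition, same cost).

-- ===== PORT A =====
-- one iteration of A's for-loop; state = (text, flag)
def pvStepA (st : String × String) (d : String × String × String) : String × String :=
  let text := st.1
  let flag := st.2
  if d.1 == " " then
    ((if flag == "delete" then text ++ "</del>" ++ d.2.2
      else if flag == "add" then text ++ "</ins>" ++ d.2.2
      else if flag == "common" then text ++ d.2.2
      else text), "common")
  else if d.1 == "-" then
    ((if flag == "common" then text ++ "<del>" ++ d.2.2
      else if flag == "delete" then text ++ d.2.2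
      else if flag == "add" then text ++ "</ins>" ++ "<del>" ++ d.2.2
      else text), "delete")
  else if d.1 == "+" then
    ((if flag == "common" then text ++ "<ins>" ++ d.2.2
      else if flag == "add" then text ++ d.2.2
      else if flag == "delete" then text ++ "</del>" ++ "<ins>" ++ d.2.2
      else text), "add")
  else (text, flag)

def merge_text_diff (diff : List (String × String × String)) : String :=
  let st := diff.foldl pvStepA ("", "common")
  st.1 ++ (if st.2 == "add" then "</ins>" else if st.2 == "delete" then "</del>" else "")

-- ===== PORT B =====
def pvWrap (m : String) (t : String) : String :=
  if m == "-" then "<del>" ++ t ++ "</del>"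
  else if m == "+" then "<ins>" ++ t ++ "</ins>"
  else t

-- group-then-wrap over the kept (marker, text) pairs: one maximal run per step
def pvEmit : List (String × String) → String
  | [] => ""
  | (m, t) :: rest =>
    pvWrap m (t ++ String.join ((rest.takeWhile (fun p => p.1 == m)).map Prod.snd)) ++
      pvEmit (rest.dropWhile (fun p => p.1 == m))
termination_by l => l.length
decreasing_by
  simp only [List.length_cons]
  exact Nat.lt_succ_of_le (List.length_dropWhile_le _ _)

def merge_text_diff_alt (diff : List (String × String × String)) : String :=
  pvEmit ((diff.filter (fun d => d.1 == " " || d.1 == "-" || d.1 == "+")).map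
    (fun d => (d.1, d.2.2)))

-- ===== PRECONDITION & SPEC =====
def Spec_merge_text_diff (diff : List (String × String × String)) (out : String) : Prop := out = merge_text_diff_alt diff
instance (diff : List (String × String × String)) (out : String) : Decidable (Spec_merge_text_diff diff out) := by unfold Spec_merge_text_diff; infer_instance

-- ===== CLAIM (what is proved, stated in full; the proofs are below) =====
def Claim_equal_merge_text_diff : Prop := ∀ (diff : List (String × String × String)), Dom_merge_text_diff diff → Spec_merge_text_diff diff (merge_text_diff diff)

-- ===== LEMMAS AND PROOFS =====

-- marker → A's flag value
def pvFl (m : String) : String := if m = "-" then "delete" else if m = "+" then "add" else "common"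
def pvClose (f : String) : String := if f = "add" then "</ins>" else if f = "delete" then "</del>" else ""
def pvOpen (f : String) : String := if f = "add" then "<ins>" else if f = "delete" then "<del>" else ""

def pvKeep (d : String × String × String) : Bool := d.1 == " " || d.1 == "-" || d.1 == "+"

def pvKept (diff : List (String × String × String)) : List (String × String) :=
  (diff.filter pvKeep).map (fun d => (d.1, d.2.2))

-- characterized step on kept pairs
def pvKStep (st : String × String) (p : String × String) : String × String :=
  (st.1 ++ (if pvFl p.1 = st.2 then "" else pvClose st.2 ++ pvOpen (pvFl p.1)) ++ p.2, pvFl p.1)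

def pvThree (f : String) : Prop := f = "common" ∨ f = "delete" ∨ f = "add"

theorem pvFl_three (m : String) : pvThree (pvFl m) := by
  unfold pvFl pvThree; split_ifs <;> simp

theorem pvStepA_skip (st : String × String) (d : String × String × String)
    (h : pvKeep d = false) : pvStepA st d = st := by
  unfold pvKeep at h
  unfold pvStepA
  simp only [Bool.or_eq_false_iff, beq_eq_false_iff_ne, ne_eq] at h
  simp [h.1.1, h.1.2, h.2]

theorem pvStepA_keep (st : String × String) (d : String × String × String)
    (hf : pvThree st.2) (h : pvKeep d = true) :
    pvStepA st d = pvKStep st (d.1, d.2.2) := by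
  unfold pvKeep at h
  simp only [Bool.or_eq_true, beq_iff_eq] at h
  obtain ⟨text, flag⟩ := st
  obtain ⟨m, x, t⟩ := d
  simp only at h
  unfold pvThree at hf
  simp only at hf
  unfold pvStepA pvKStep pvFl pvClose pvOpen
  rcases h with (h | h) | h <;> rcases hf with hf | hf | hf <;> subst h <;> subst hf <;>
    simp [String.append_assoc]

theorem pvKStep_three (st : String × String) (p : String × String) :
    pvThree (pvKStep st p).2 := pvFl_three p.1

theorem pvFold_kept (l : List (String × String × String)) (st : String × String)
    (hf : pvThree st.2) :
    l.foldl pvStepA st = (pvKept l).foldl pvKStep st := by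
  induction l generalizing st with
  | nil => rfl
  | cons d l ih =>
    unfold pvKept
    by_cases hk : pvKeep d = true
    · simp only [List.foldl_cons, List.filter_cons, hk, if_pos, List.map_cons]
      rw [pvStepA_keep st d hf hk]
      exact ih _ (pvKStep_three _ _)
    · simp only [Bool.not_eq_true] at hk
      simp only [List.foldl_cons, List.filter_cons, hk]
      rw [pvStepA_skip st d hk]
      exact ih _ hf
    
-- prefix property of the kept fold
theorem pvFold_prefix (l : List (String × String)) (s f : String) :
    l.foldl pvKStep (s, f) =
      (s ++ (l.foldl pvKStep ("", f)).1, (l.foldl pvKStep ("", f)).2) := by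
  induction l generalizing s f with
  | nil => simp
  | cons p l ih =>
    simp only [List.foldl_cons, pvKStep]
    rw [ih (s ++ (if pvFl p.1 = f then "" else pvClose f ++ pvOpen (pvFl p.1)) ++ p.2) (pvFl p.1),
        ih ("" ++ (if pvFl p.1 = f then "" else pvClose f ++ pvOpen (pvFl p.1)) ++ p.2) (pvFl p.1)]
    simp [String.append_assoc]

-- running through a uniform run of marker m with flag already pvFl m just appends the texts
theorem pvJoin_foldl (L : List String) (s : String) :
    L.foldl (· ++ ·) s = s ++ String.join L := by
  induction L generalizing s with
  | nil => simp [String.join]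
  | cons a L ih =>
    have hj : String.join (a :: L) = ("" ++ a) ++ String.join L := by
      simp only [String.join, List.foldl_cons]
      exact ih ("" ++ a)
    simp only [List.foldl_cons, hj]
    rw [ih]
    simp [String.append_assoc]

theorem pvFold_group (l : List (String × String)) (m : String)
    (hall : ∀ p ∈ l, p.1 = m) (s : String) :
    l.foldl pvKStep (s, pvFl m) = (s ++ String.join (l.map Prod.snd), pvFl m) := by
  induction l generalizing s with
  | nil => simp [String.join]
  | cons p l ih =>
    have hm : p.1 = m := hall p (List.mem_cons_self ..)
    have hj : String.join (p.2 :: l.map Prod.snd) = ("" ++ p.2) ++ String.join (l.map Prod.snd) := by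
      simp only [String.join, List.foldl_cons]
      exact pvJoin_foldl _ _
    simp only [List.foldl_cons, pvKStep, hm, List.map_cons, hj]
    rw [ih (fun q hq => hall q (List.mem_cons_of_mem _ hq))]
    simp [String.append_assoc]

theorem pvWrap_eq (m t : String) : pvWrap m t = pvOpen (pvFl m) ++ t ++ pvClose (pvFl m) := by
  unfold pvWrap pvOpen pvClose pvFl
  split_ifs <;> simp_all

def pvMarker (m : String) : Prop := m = " " ∨ m = "-" ∨ m = "+"

theorem pvFl_inj {m m' : String} (hm : pvMarker m) (hm' : pvMarker m')
    (h : pvFl m = pvFl m') : m = m' := by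
  unfold pvFl at h
  rcases hm with h1|h1|h1 <;> rcases hm' with h2|h2|h2 <;> subst h1 <;> subst h2 <;> simp_all

-- the main correspondence: A's run (text plus closing tag) from flag f equals close f ++ emit
theorem pvMain (n : ℕ) (l : List (String × String)) (hn : l.length ≤ n)
    (hk : ∀ p ∈ l, pvMarker p.1) (f : String) (hf : pvThree f)
    (hhd : ∀ p, l.head? = some p → pvFl p.1 ≠ f ∨ f = "common") :
    (l.foldl pvKStep ("", f)).1 ++ pvClose (l.foldl pvKStep ("", f)).2 =
      pvClose f ++ pvEmit l := by
  induction n generalizing l f with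
  | zero =>
    have : l = [] := List.length_eq_zero_iff.mp (Nat.le_zero.mp hn)
    subst this
    simp [pvEmit]
  | succ n ih =>
    match l with
    | [] => simp [pvEmit]
    | (m, t) :: rest =>
      have hm : pvMarker m := hk (m, t) (List.mem_cons_self ..)
      -- the head step
      have hstep : pvKStep ("", f) (m, t) = (pvClose f ++ pvOpen (pvFl m) ++ t, pvFl m) := by
        unfold pvKStep
        rcases hhd (m, t) rfl with h | h
        · simp [h]
        · subst h
          by_cases he : pvFl m = "common"
          · simp [he, pvClose, pvOpen]
          · simp [he, pvClose]
      set tk := rest.takeWhile (fun p => p.1 == m) with htk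
      set dr := rest.dropWhile (fun p => p.1 == m) with hdr
      have hsplit : rest = tk ++ dr := (List.takeWhile_append_dropWhile).symm
      have htkall : ∀ p ∈ tk, p.1 = m := by
        intro p hp
        have := List.mem_takeWhile_imp hp
        simpa using this
      have hdrlen : dr.length ≤ n := by
        have h1 : dr.length ≤ rest.length := List.length_dropWhile_le _ _
        have h2 : rest.length + 1 ≤ n + 1 := by simpa using hn
        omega
      have hdrk : ∀ p ∈ dr, pvMarker p.1 := by
        intro p hp
        exact hk p (by rw [hsplit]; exact List.mem_cons_of_mem _ (List.mem_append_right _ hp))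
      have hdrhd : ∀ p, dr.head? = some p → pvFl p.1 ≠ pvFl m ∨ pvFl m = "common" := by
        intro p hp
        by_cases hc : pvFl m = "common"
        · exact Or.inr hc
        · left
          intro he
          have hpm : p.1 ≠ m := by
            have := List.head?_dropWhile_not (fun p => p.1 == m) rest
            rw [← hdr, hp] at this
            simpa using this
          exact hpm (pvFl_inj (hdrk p (List.mem_of_mem_head? hp)) hm he)
      -- run the fold
      have hfold : ((m, t) :: rest).foldl pvKStep ("", f) =
          ((pvClose f ++ pvOpen (pvFl m) ++ (t ++ String.join (tk.map Prod.snd))) ++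
            (dr.foldl pvKStep ("", pvFl m)).1, (dr.foldl pvKStep ("", pvFl m)).2) := by
        rw [List.foldl_cons, hstep, hsplit, List.foldl_append]
        rw [pvFold_group tk m htkall]
        rw [pvFold_prefix]
        simp [String.append_assoc]
      rw [hfold]
      have hih := ih dr hdrlen hdrk (pvFl m) (pvFl_three m) hdrhd
      show (pvClose f ++ pvOpen (pvFl m) ++ (t ++ String.join (tk.map Prod.snd))) ++
            (dr.foldl pvKStep ("", pvFl m)).1 ++ pvClose (dr.foldl pvKStep ("", pvFl m)).2
          = pvClose f ++ pvEmit ((m, t) :: rest)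
      rw [String.append_assoc, String.append_assoc, hih]
      rw [pvEmit]
      rw [pvWrap_eq]
      simp [String.append_assoc, htk, hdr]

-- ===== VERDICT (by name: the statement is the Claim_ definition above) =====
theorem merge_text_diff_spec : Claim_equal_merge_text_diff := by
  intro diff _
  unfold Spec_merge_text_diff merge_text_diff merge_text_diff_alt
  have hthree : pvThree ("common" : String) := Or.inl rfl
  rw [show (("" : String), ("common" : String)) = (("" : String), ("common" : String)) from rfl]
  rw [pvFold_kept diff ("", "common") hthree]
  have hk : ∀ p ∈ pvKept diff, pvMarker p.1 := by
    intro p hp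
    unfold pvKept at hp
    obtain ⟨d, hd, rfl⟩ := List.mem_map.mp hp
    have := (List.mem_filter.mp hd).2
    unfold pvKeep at this
    simp only [Bool.or_eq_true, beq_iff_eq] at this
    unfold pvMarker
    tauto
  have := pvMain (pvKept diff).length (pvKept diff) le_rfl hk "common" hthree
    (fun p _ => Or.inr rfl)
  have hcl : ∀ g : String, (if g == "add" then "</ins>" else if g == "delete" then "</del>" else "") = pvClose g := by
    intro g; unfold pvClose; simp
  simp only [hcl]
  rw [this]
  simp only [pvClose, if_neg (by decide : ¬("common" : String) = "add"),
    if_neg (by decide : ¬("common" : String) = "delete")]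
  simp only [String.empty_append]
  rfl
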